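-- pv_equiv track=rewrite | github.com/Sourav1326/placement_predictor_light | src/comprehensive_assessment.py | _select_diverse_questions
-- ===== SOURCE A (Python) =====
-- from typing import Dict, List, Any, Tuple
--
-- def _select_diverse_questions(questions: List[Dict], num_questions: int) -> List[Dict]:
--     """Select questions ensuring topic diversity"""
--     if len(questions) <= num_questions:
--         return questions
--
--     # Group by topic for diversity
--     topics = {}
--     for q in questions:
--         topic = q.get('topic', 'general')
--         if topic not in topics:
--             topics[topic] = []
--         topics[topic].append(q)
--
--     # Select questions with topic diversity
--     selected = []
--     topic_names = list(topics.keys())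
--
--     for i in range(num_questions):
--         topic = topic_names[i % len(topic_names)]
--         if topics[topic]:
--             selected.append(topics[topic].pop(0))
--
--     return selected
-- ===== SOURCE B (Python) =====
-- def _select_diverse_questions(questions, num_questions):
--     """Select questions ensuring topic diversity (index-then-select-and-sort)."""
--     if len(questions) <= num_questions:
--         return questions
--
--     # One pass: tag each question with (occurrence-within-topic, topic-first-appearance-index)
--     topic_index = {}
--     occ_count = {}
--     slotted = []
--     for q in questions:
--         t = q.get('topic', 'general')
--         if t not in topic_index:
--             topic_index[t] = len(topic_index)
--         k = occ_count.get(t, 0)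
--         occ_count[t] = k + 1
--         slotted.append((k, topic_index[t], q))
--
--     # Round-robin slot of a question is occurrence * T + topic_index; keep slots < num_questions
--     T = len(topic_index)
--     picked = [(k * T + j, q) for (k, j, q) in slotted if k * T + j < num_questions]
--     picked.sort(key=lambda p: p[0])
--     return [q for _, q in picked]
-- ===== Notes on version B (the rewrite author's own statement) =====
-- stated objective: alternative
-- what changed: Replaces the round-robin loop with stateful pop(0) from per-topic buckets by a single tagging pass (occurrence index within topic, topic first-appearance index) that computes each question's round-robin slot arithmetically, then filters slots < num_questions and sorts by slot.
import Mathlib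
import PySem

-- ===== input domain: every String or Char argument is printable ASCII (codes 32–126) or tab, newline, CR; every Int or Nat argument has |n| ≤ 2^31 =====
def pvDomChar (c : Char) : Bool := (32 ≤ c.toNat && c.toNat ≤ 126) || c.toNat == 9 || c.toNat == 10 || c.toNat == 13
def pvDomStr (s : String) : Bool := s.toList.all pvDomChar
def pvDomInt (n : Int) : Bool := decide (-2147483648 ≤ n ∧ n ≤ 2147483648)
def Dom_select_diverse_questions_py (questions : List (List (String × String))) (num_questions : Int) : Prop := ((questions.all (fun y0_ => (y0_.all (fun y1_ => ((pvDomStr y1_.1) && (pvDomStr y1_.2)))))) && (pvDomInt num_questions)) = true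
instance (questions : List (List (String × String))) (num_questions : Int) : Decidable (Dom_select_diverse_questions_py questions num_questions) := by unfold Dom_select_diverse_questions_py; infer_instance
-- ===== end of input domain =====

-- B replaces A's round-robin pop(0) loop by one tagging pass (occurrence-in-topic index, topic
-- first-appearance index) that computes each question's round-robin slot arithmetically, then
-- filters slots < num_questions and sorts by slot (objective: alternative algorithm).

-- ===== PORT A =====
-- topic = q.get('topic', 'general')
def pvTopicOf (q : List (String × String)) : String :=
  PySem.Dict.getD (PySem.Dict.mk q) "topic" "general"

-- body of 'for q in questions: …' (grouping loop: setdefault-style insert, then append)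
def pvGroupStep (d : PySem.Dict String (List (List (String × String)))) (q : List (String × String)) :
    PySem.Dict String (List (List (String × String))) :=
  PySem.Dict.modify (if d.contains (pvTopicOf q) then d else d.insert (pvTopicOf q) [])
    (pvTopicOf q) [] (fun b => b ++ [q])

-- body of 'for i in range(num_questions): …'; state = (topics, selected)
def pvPickStep (topic_names : List String)
    (st : PySem.Dict String (List (List (String × String))) × List (List (String × String)))
    (i : Int) :
    PySem.Dict String (List (List (String × String))) × List (List (String × String)) :=
  match PySem.List.pyGet? topic_names (PySem.Int.mod i (topic_names.length : Int)) with
  | none => st   -- unreachable: the loop body only runs when topic_names is nonempty (Python would raise)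
  | some topic =>
    match st.1.getD topic [] with
    | [] => st
    | q :: rest => (st.1.insert topic rest, st.2 ++ [q])

def select_diverse_questions_py (questions : List (List (String × String))) (num_questions : Int) :
    List (List (String × String)) :=
  if (questions.length : Int) ≤ num_questions then questions
  else
    let topics := questions.foldl pvGroupStep PySem.Dict.empty
    let topic_names := topics.keys
    let st := (PySem.List.pyRange 0 num_questions 1).foldl (pvPickStep topic_names) (topics, [])
    st.2

-- ===== PORT B =====
-- body of the tagging pass; state = (topic_index, occ_count, slotted)
def pvTagStep
    (st : PySem.Dict String Int × PySem.Dict String Int × List (Int × Int × List (String × String)))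
    (q : List (String × String)) :
    PySem.Dict String Int × PySem.Dict String Int × List (Int × Int × List (String × String)) :=
  ((if st.1.contains (pvTopicOf q) then st.1 else st.1.insert (pvTopicOf q) ((st.1.size : Int))),
   st.2.1.insert (pvTopicOf q) (st.2.1.getD (pvTopicOf q) 0 + 1),
   st.2.2 ++ [(st.2.1.getD (pvTopicOf q) 0,
     (if st.1.contains (pvTopicOf q) then st.1
      else st.1.insert (pvTopicOf q) ((st.1.size : Int))).getD (pvTopicOf q) 0, q)])

def select_diverse_questions_py_alt (questions : List (List (String × String))) (num_questions : Int) :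
    List (List (String × String)) :=
  if (questions.length : Int) ≤ num_questions then questions
  else
    let st := questions.foldl pvTagStep (PySem.Dict.empty, PySem.Dict.empty, [])
    let T : Int := (st.1.size : Int)
    let picked := (st.2.2.filter (fun p => decide (p.1 * T + p.2.1 < num_questions))).map
      (fun p => (p.1 * T + p.2.1, p.2.2))
    (PySem.List.sorted picked (fun p => p.1) false).map (fun p => p.2)

-- ===== PRECONDITION & SPEC =====
def Spec_select_diverse_questions_py (questions : List (List (String × String))) (num_questions : Int) (out : List (List (String × String))) : Prop := out = select_diverse_questions_py_alt questions num_questions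
instance (questions : List (List (String × String))) (num_questions : Int) (out : List (List (String × String))) : Decidable (Spec_select_diverse_questions_py questions num_questions out) := by unfold Spec_select_diverse_questions_py; infer_instance

-- ===== CLAIM (what is proved, stated in full; the proofs are below) =====
def Claim_equal_select_diverse_questions_py : Prop := ∀ (questions : List (List (String × String))) (num_questions : Int), Dom_select_diverse_questions_py questions num_questions → Spec_select_diverse_questions_py questions num_questions (select_diverse_questions_py questions num_questions)

-- ===== LEMMAS AND PROOFS =====

def pvNames (l : List (List (String × String))) : List String :=
  PySem.Set.ofList (l.map pvTopicOf)

def pvBkt (l : List (List (String × String))) (t : String) : List (List (String × String)) :=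
  l.filter (fun q => pvTopicOf q == t)

theorem pvGroup_spec (l : List (List (String × String))) :
    (l.foldl pvGroupStep PySem.Dict.empty).keys = pvNames l ∧
    (∀ t, (l.foldl pvGroupStep PySem.Dict.empty).getD t [] = pvBkt l t) := by
  induction l using List.reverseRecOn with
  | nil =>
      refine ⟨rfl, fun t => ?_⟩
      simp [pvBkt, PySem.Dict.getD_empty]
  | append_singleton l q ih =>
      obtain ⟨hk, hg⟩ := ih
      rw [List.foldl_append]
      simp only [List.foldl_cons, List.foldl_nil]
      have hnames : pvNames (l ++ [q]) = PySem.Set.add (pvNames l) (pvTopicOf q) := by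
        simp [pvNames, List.map_append, PySem.Set.ofList_append_singleton]
      have hbkt : ∀ t, pvBkt (l ++ [q]) t = pvBkt l t ++ (if pvTopicOf q = t then [q] else []) := by
        intro t
        simp only [pvBkt, List.filter_append, List.filter_cons, List.filter_nil, beq_iff_eq]
      set D := l.foldl pvGroupStep PySem.Dict.empty with hD
      by_cases hc : D.contains (pvTopicOf q) = true
      · have hmem : pvTopicOf q ∈ pvNames l := hk ▸ ((PySem.Dict.contains_iff_mem_keys D _).mp hc)
        refine ⟨?_, fun t => ?_⟩
        · rw [hnames, PySem.Set.add_of_mem hmem]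
          simp only [pvGroupStep, hc, if_true, PySem.Dict.keys_modify]
          rw [PySem.Dict.keys_insert_of_contains _ _ hc, hk]
        · rw [hbkt]
          rw [show pvGroupStep D q = PySem.Dict.modify D (pvTopicOf q) [] (fun b => b ++ [q]) by
            simp [pvGroupStep, hc]]
          rw [PySem.Dict.getD_modify]
          by_cases ht : t = pvTopicOf q
          · simp [ht, hg]
          · simp [ht, hg]
            exact fun h => ht h.symm
      · have hnc : D.contains (pvTopicOf q) = false := by simpa using hc
        have hmem : pvTopicOf q ∉ pvNames l := fun h =>
          hc ((PySem.Dict.contains_iff_mem_keys D _).mpr (hk ▸ h))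
        refine ⟨?_, fun t => ?_⟩
        · rw [hnames, PySem.Set.add_of_not_mem hmem]
          simp only [pvGroupStep, hnc, Bool.false_eq_true, if_false, PySem.Dict.keys_modify]
          rw [PySem.Dict.keys_insert_of_contains, PySem.Dict.keys_insert_of_not_contains _ _ hnc, hk]
          simp [PySem.Dict.contains_insert]
        · rw [hbkt]
          rw [show pvGroupStep D q
              = PySem.Dict.modify (D.insert (pvTopicOf q) []) (pvTopicOf q) [] (fun b => b ++ [q]) by
            simp [pvGroupStep, hnc]]
          rw [PySem.Dict.getD_modify]
          by_cases ht : t = pvTopicOf q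
          · rw [if_pos ht, PySem.Dict.getD_insert, if_pos rfl, ht, ← hg (pvTopicOf q),
              PySem.Dict.getD_of_not_contains D _ hnc]
            simp
          · rw [if_neg ht, PySem.Dict.getD_insert, if_neg ht, hg,
              if_neg (fun h : pvTopicOf q = t => ht h.symm)]
            simp

def pvCnt (T m j : Nat) : Nat := (List.range m).countP (fun i => i % T == j)

def pvNth (N : List String) (j : Nat) : String := N.getD j ""
-- selected round-robin pairs (slot, question) after m iterations

def pvSel (N : List String) (l : List (List (String × String))) (m : Nat) :
    List (Nat × List (String × String)) :=
  (List.range m).filterMap (fun i => ((pvBkt l (pvNth N (i % N.length)))[(i / N.length)]?).map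
    (fun q2 => (i, q2)))

theorem pvCnt_succ (T m j : Nat) :
    pvCnt T (m+1) j = pvCnt T m j + (if m % T = j then 1 else 0) := by
  simp [pvCnt, List.range_succ, List.countP_append, List.countP_cons]

theorem pvCnt_formula (T j : Nat) (hT : 0 < T) (hj : j < T) (m : Nat) :
    pvCnt T m j = m / T + (if j < m % T then 1 else 0) := by
  induction m with
  | zero => simp [pvCnt, Nat.zero_mod]
  | succ m ih =>
      rw [pvCnt_succ, ih]
      rcases Nat.lt_or_ge (m % T + 1) T with h | h
      · have hdiv : (m + 1) / T = m / T := by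
          conv_lhs => rw [← Nat.div_add_mod m T]
          rw [show T * (m / T) + m % T + 1 = (m % T + 1) + T * (m / T) by ring]
          rw [Nat.add_mul_div_left _ _ hT, Nat.div_eq_of_lt h, Nat.zero_add]
      
        have hmod : (m + 1) % T = m % T + 1 := by
          conv_lhs => rw [← Nat.div_add_mod m T]
          rw [show T * (m / T) + m % T + 1 = (m % T + 1) + (m / T) * T by ring]
          rw [Nat.add_mul_mod_self_right, Nat.mod_eq_of_lt h]
        rw [hdiv, hmod]
        have := Nat.mod_lt m hT
        by_cases hh : m % T = j <;> by_cases hh2 : j < m % T <;> simp [hh, hh2] <;> omega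
      · have hTeq : m % T + 1 = T := by have := Nat.mod_lt m hT; omega
        have hdvd : (m + 1) = T * (m / T + 1) := by
          conv_lhs => rw [← Nat.div_add_mod m T]; rw [show T * (m / T) + m % T + 1 = T * (m / T) + (m % T + 1) by ring, hTeq]
          ring
        have hdiv : (m + 1) / T = m / T + 1 := by rw [hdvd, Nat.mul_div_cancel_left _ hT]
        have hmod : (m + 1) % T = 0 := by rw [hdvd, Nat.mul_mod_right]
        rw [hdiv, hmod]
        by_cases hh : m % T = j <;> simp [hh] <;> omega
      

theorem pvCnt_self (T m : Nat) (hT : 0 < T) : pvCnt T m (m % T) = m / T := by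
  rw [pvCnt_formula T _ hT (Nat.mod_lt m hT)]; simp

theorem pvLoop (l : List (List (String × String))) (N : List String)
    (D0 : PySem.Dict String (List (List (String × String))))
    (hg : ∀ t, D0.getD t [] = pvBkt l t)
    (hnd : N.Nodup) (hT : 0 < N.length) (m : Nat) :
    (∀ j, j < N.length →
      (((List.range m).foldl (fun st (k : Nat) => pvPickStep N st ((0:Int) + (k:Int))) (D0, [])).1).getD (pvNth N j) []
        = (pvBkt l (pvNth N j)).drop (pvCnt N.length m j)) ∧
    (((List.range m).foldl (fun st (k : Nat) => pvPickStep N st ((0:Int) + (k:Int))) (D0, [])).2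
        = (pvSel N l m).map Prod.snd) := by
  induction m with
  | zero => exact ⟨fun j hj => by simpa [pvCnt] using hg (pvNth N j), by simp [pvSel]⟩
  | succ m ih =>
      obtain ⟨ih1, ih2⟩ := ih
      rw [List.range_succ] at *
      rw [List.foldl_append] at *
      simp only [List.foldl_cons, List.foldl_nil] at *
      set S := (List.range m).foldl (fun st (k : Nat) => pvPickStep N st ((0:Int) + (k:Int))) (D0, []) with hS
      have hmT : m % N.length < N.length := Nat.mod_lt m hT
      have htopic : PySem.List.pyGet? N (PySem.Int.mod ((0:Int) + (m:Int)) (N.length : Int))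
          = some (pvNth N (m % N.length)) := by
        rw [zero_add, PySem.Int.mod_natCast, PySem.List.pyGet?_natCast,
          List.getElem?_eq_getElem hmT]
        simp [pvNth, List.getD_eq_getElem?_getD, List.getElem?_eq_getElem hmT]
      have hbm : S.1.getD (pvNth N (m % N.length)) []
          = (pvBkt l (pvNth N (m % N.length))).drop (m / N.length) := by
        rw [ih1 _ hmT, pvCnt_self _ _ hT]
      have hnth_inj : ∀ j, j < N.length → pvNth N j = pvNth N (m % N.length) → j = m % N.length := by
        intro j hj he
        rw [pvNth, pvNth, List.getD_eq_getElem _ _ hj, List.getD_eq_getElem _ _ hmT] at he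
        exact (List.Nodup.getElem_inj_iff hnd).mp he
      rcases hdrop : (pvBkt l (pvNth N (m % N.length))).drop (m / N.length) with _ | ⟨q, rest⟩
      · -- bucket exhausted: state unchanged, nothing selected
        have hnone : (pvBkt l (pvNth N (m % N.length)))[(m / N.length)]? = none :=
          List.getElem?_eq_none (List.drop_eq_nil_iff.mp hdrop)
        have hstep : pvPickStep N S ((0:Int) + (m:Int)) = S := by
          simp only [pvPickStep, htopic]
          rw [hbm, hdrop]
        rw [hstep]
        constructor
        · intro j hj
          rw [ih1 j hj, pvCnt_succ]
          by_cases hje : m % N.length = j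
          · subst hje
            rw [if_pos rfl, pvCnt_self _ _ hT]
            rw [hdrop]
            symm
            rw [List.drop_eq_nil_iff]
            have := List.drop_eq_nil_iff.mp hdrop
            omega
          · rw [if_neg hje]
            simp
        · rw [ih2]
          simp [pvSel, List.range_succ, List.filterMap_append, hnone]
      · -- pop(0): q = bucket[m/T]
        have hlt : m / N.length < (pvBkt l (pvNth N (m % N.length))).length := by
          rcases Nat.lt_or_ge (m / N.length) (pvBkt l (pvNth N (m % N.length))).length with h | h
          · exact h
          · rw [List.drop_eq_nil_iff.mpr h] at hdrop; cases hdrop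
        have hcomb : q :: rest
            = (pvBkt l (pvNth N (m % N.length)))[m / N.length]
              :: (pvBkt l (pvNth N (m % N.length))).drop (m / N.length + 1) := by
          rw [← hdrop]; exact List.drop_eq_getElem_cons hlt
        have hq : q = (pvBkt l (pvNth N (m % N.length)))[m / N.length] := by
          injection hcomb
        have hrest : rest = (pvBkt l (pvNth N (m % N.length))).drop (m / N.length + 1) := by
          injection hcomb
        have hsome : (pvBkt l (pvNth N (m % N.length)))[(m / N.length)]? = some q := by
          rw [List.getElem?_eq_getElem hlt, hq]
        have hstep : pvPickStep N S ((0:Int) + (m:Int))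
            = (S.1.insert (pvNth N (m % N.length)) rest, S.2 ++ [q]) := by
          simp only [pvPickStep, htopic]
          rw [hbm, hdrop]
        rw [hstep]
        constructor
        · intro j hj
          simp only []
          rw [PySem.Dict.getD_insert]
          by_cases hje : pvNth N j = pvNth N (m % N.length)
          · rw [if_pos hje]
            have hj' : j = m % N.length := hnth_inj j hj hje
            subst hj'
            rw [hje, hrest, pvCnt_succ, if_pos rfl, pvCnt_self _ _ hT]
          · rw [if_neg hje, ih1 j hj, pvCnt_succ,
              if_neg (fun he : m % N.length = j => hje (by rw [he]))]
            simp
        · simp only []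
          rw [ih2]
          simp [pvSel, List.range_succ, List.filterMap_append, hsome]

def pvFlat (l : List (List (String × String))) : List (Int × Int × List (String × String)) :=
  (PySem.List.enumerate (pvNames l) 0).flatMap
    (fun p => (PySem.List.enumerate (pvBkt l p.2) 0).map (fun kq => (kq.1, p.1, kq.2)))

theorem pvNames_append (l : List (List (String × String))) (q : List (String × String)) :
    pvNames (l ++ [q]) = PySem.Set.add (pvNames l) (pvTopicOf q) := by
  simp [pvNames, List.map_append, PySem.Set.ofList_append_singleton]

theorem pvNames_nodup (l : List (List (String × String))) : (pvNames l).Nodup :=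
  PySem.Set.nodup_ofList _

theorem pvBkt_append (l : List (List (String × String))) (q : List (String × String)) (t : String) :
    pvBkt (l ++ [q]) t = pvBkt l t ++ (if pvTopicOf q = t then [q] else []) := by
  simp only [pvBkt, List.filter_append, List.filter_cons, List.filter_nil, beq_iff_eq]

theorem pvBkt_nil_of_not_mem (l : List (List (String × String))) (t : String)
    (h : t ∉ pvNames l) : pvBkt l t = [] := by
  rw [pvBkt, List.filter_eq_nil_iff]
  intro q hq hbeq
  exact h (by
    rw [pvNames, PySem.Set.mem_ofList]
    exact (beq_iff_eq.mp hbeq) ▸ List.mem_map_of_mem hq)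

theorem pvTag_spec (l : List (List (String × String))) :
    (l.foldl pvTagStep (PySem.Dict.empty, PySem.Dict.empty, [])).1.items
        = (PySem.List.enumerate (pvNames l) 0).map (fun p => (p.2, p.1)) ∧
    (∀ t, (l.foldl pvTagStep (PySem.Dict.empty, PySem.Dict.empty, [])).2.1.getD t 0
        = ((pvBkt l t).length : Int)) ∧
    (l.foldl pvTagStep (PySem.Dict.empty, PySem.Dict.empty, [])).2.2.Perm (pvFlat l) := by
  induction l using List.reverseRecOn with
  | nil =>
      refine ⟨rfl, fun t => by simp [pvBkt, PySem.Dict.getD_empty], ?_⟩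
      simp [pvFlat, pvNames, PySem.List.enumerate]
  | append_singleton l q ih =>
      obtain ⟨ha, hb, hc⟩ := ih
      rw [List.foldl_append]
      simp only [List.foldl_cons, List.foldl_nil]
      set S := l.foldl pvTagStep (PySem.Dict.empty, PySem.Dict.empty, []) with hSdef
      set N := pvNames l with hN
      have hkeys : S.1.keys = N := by
        show S.1.items.map Prod.fst = N
        rw [ha, List.map_map]
        have : (Prod.fst ∘ fun p : Int × String => (p.2, p.1)) = Prod.snd := rfl
        rw [this, PySem.List.map_snd_enumerate]
      have hnd : N.Nodup := pvNames_nodup l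
      by_cases hm : pvTopicOf q ∈ N
      · -- existing topic
        have hcont : S.1.contains (pvTopicOf q) = true :=
          (PySem.Dict.contains_iff_mem_keys S.1 _).mpr (hkeys ▸ hm)
        obtain ⟨N1, N2, hsplit⟩ := List.append_of_mem hm
        have hndN : (N1 ++ pvTopicOf q :: N2).Nodup := hsplit ▸ hnd
        have ht1 : pvTopicOf q ∉ N1 := fun h =>
          (List.disjoint_of_nodup_append hndN) h List.mem_cons_self
        have ht2 : pvTopicOf q ∉ N2 :=
          (List.nodup_cons.mp (hndN.of_append_right)).1
        have hmemenum : ((N1.length : Int), pvTopicOf q) ∈ PySem.List.enumerate N 0 := by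
          rw [hsplit, PySem.List.enumerate_append, PySem.List.enumerate_cons]
          simp
        have hidx : S.1.getD (pvTopicOf q) 0 = (N1.length : Int) := by
          apply PySem.Dict.getD_of_mem_items S.1 _ (hkeys ▸ hnd)
          rw [ha]
          exact List.mem_map_of_mem hmemenum
        have hnames' : pvNames (l ++ [q]) = N := by
          rw [pvNames_append, PySem.Set.add_of_mem hm]
        refine ⟨?_, fun t => ?_, ?_⟩
        · simp only [pvTagStep, hcont, if_true, hnames']
          exact ha
        · simp only [pvTagStep, hcont, if_true, PySem.Dict.getD_insert, pvBkt_append]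
          by_cases htq : t = pvTopicOf q
          · rw [if_pos htq, htq, hb]
            simp
          · rw [if_neg htq, hb, if_neg (fun h : pvTopicOf q = t => htq h.symm)]
            simp
        · simp only [pvTagStep, hcont, if_true]
          -- new element e
          rw [hb (pvTopicOf q), hidx]
          set e : Int × Int × List (String × String)
            := (((pvBkt l (pvTopicOf q)).length : Int), (N1.length : Int), q) with he
          -- decompose pvFlat (l ++ [q])
          have hflat' : pvFlat (l ++ [q])
              = (PySem.List.enumerate N1 0).flatMap
                  (fun p => (PySem.List.enumerate (pvBkt l p.2) 0).map (fun kq => (kq.1, p.1, kq.2)))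
                ++ ((((PySem.List.enumerate (pvBkt l (pvTopicOf q)) 0).map
                      (fun kq => (kq.1, (N1.length : Int), kq.2))) ++ [e])
                ++ (PySem.List.enumerate N2 ((0:Int) + (N1.length : Int) + 1)).flatMap
                  (fun p => (PySem.List.enumerate (pvBkt l p.2) 0).map (fun kq => (kq.1, p.1, kq.2)))) := by
            rw [pvFlat, hnames', hsplit, PySem.List.enumerate_append, PySem.List.enumerate_cons,
              List.flatMap_append, List.flatMap_cons]
            congr 1
            · apply List.flatMap_congr
              intro p hp
              have hpne : p.2 ≠ pvTopicOf q := by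
                rcases (PySem.List.mem_enumerate_iff N1 0 p).mp hp with ⟨k, hk, rfl⟩
                exact fun h => ht1 (h ▸ N1.getElem_mem hk)
              rw [pvBkt_append, if_neg (fun h => hpne h.symm), List.append_nil]
            congr 1
            · rw [pvBkt_append, if_pos rfl, PySem.List.enumerate_append,
                PySem.List.enumerate_cons]
              simp only [List.map_append, zero_add]
              simp [he, PySem.List.enumerate]
            · apply List.flatMap_congr
              intro p hp
              have hpne : p.2 ≠ pvTopicOf q := by
                rcases (PySem.List.mem_enumerate_iff N2 _ p).mp hp with ⟨k, hk, rfl⟩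
                exact fun h => ht2 (h ▸ N2.getElem_mem hk)
              rw [pvBkt_append, if_neg (fun h => hpne h.symm), List.append_nil]
          have hflat : pvFlat l
              = (PySem.List.enumerate N1 0).flatMap
                  (fun p => (PySem.List.enumerate (pvBkt l p.2) 0).map (fun kq => (kq.1, p.1, kq.2)))
                ++ (((PySem.List.enumerate (pvBkt l (pvTopicOf q)) 0).map
                      (fun kq => (kq.1, (N1.length : Int), kq.2)))
                ++ (PySem.List.enumerate N2 ((0:Int) + (N1.length : Int) + 1)).flatMap
                  (fun p => (PySem.List.enumerate (pvBkt l p.2) 0).map (fun kq => (kq.1, p.1, kq.2)))) := by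
            rw [pvFlat, ← hN, hsplit, PySem.List.enumerate_append, PySem.List.enumerate_cons,
              List.flatMap_append, List.flatMap_cons]
            simp
          rw [hflat']
          refine List.Perm.trans (hc.append_right [e]) ?_
          rw [hflat]
          simp only [List.perm_iff_count, List.count_append]
          intro a
          ring
      · -- new topic
        have hncont : S.1.contains (pvTopicOf q) = false := by
          rcases h : S.1.contains (pvTopicOf q) with _ | _
          · rfl
          · exact absurd (hkeys ▸ (PySem.Dict.contains_iff_mem_keys S.1 _).mp h) hm
        have hnames' : pvNames (l ++ [q]) = N ++ [pvTopicOf q] := by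
          rw [pvNames_append, PySem.Set.add_of_not_mem hm]
        have hbnil : pvBkt l (pvTopicOf q) = [] := pvBkt_nil_of_not_mem l _ hm
        have hsize : (S.1.size : Int) = (N.length : Int) := by
          show ((S.1.items.length : Nat) : Int) = _
          rw [ha]
          simp [PySem.List.length_enumerate]
        refine ⟨?_, fun t => ?_, ?_⟩
        · simp only [pvTagStep, hncont, Bool.false_eq_true, if_false, hnames']
          rw [PySem.Dict.items_insert_of_not_contains S.1 _ hncont, ha, hsize,
            PySem.List.enumerate_append]
          simp [PySem.List.enumerate]
        · simp only [pvTagStep, hncont, PySem.Dict.getD_insert, pvBkt_append]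
          by_cases htq : t = pvTopicOf q
          · rw [if_pos htq, htq, hb, hbnil]
            simp
          · rw [if_neg htq, hb, if_neg (fun h : pvTopicOf q = t => htq h.symm)]
            simp
        · simp only [pvTagStep, hncont, Bool.false_eq_true, if_false]
          rw [hb (pvTopicOf q), hbnil, PySem.Dict.getD_insert, if_pos rfl, hsize]
          have hflat' : pvFlat (l ++ [q])
              = pvFlat l ++ [((0 : Int), (N.length : Int), q)] := by
            rw [pvFlat, hnames', PySem.List.enumerate_append, List.flatMap_append, pvFlat, ← hN]
            congr 1
            · apply List.flatMap_congr
              intro p hp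
              have hpne : p.2 ≠ pvTopicOf q := by
                rcases (PySem.List.mem_enumerate_iff N 0 p).mp hp with ⟨k, hk, rfl⟩
                exact fun h => hm (h ▸ N.getElem_mem hk)
              rw [pvBkt_append, if_neg (fun h => hpne h.symm), List.append_nil]
            · simp [PySem.List.enumerate, pvBkt_append, hbnil]
          rw [hflat']
          simp only [List.length_nil, Nat.cast_zero] at *
          exact hc.append_right _

theorem pvSlotMod (T : Nat) (a j : Int) (h1 : 0 ≤ j) (h2 : j < (T:Int)) :
    (a * (T:Int) + j) % (T:Int) = j := by
  rw [add_comm, mul_comm, Int.add_mul_emod_self_left]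
  exact Int.emod_eq_of_lt h1 h2

theorem pvDecode (T j k : Nat) (hT : 0 < T) (hj : j < T) :
    (k * T + j) % T = j ∧ (k * T + j) / T = k := by
  constructor
  · rw [add_comm, Nat.add_mul_mod_self_right, Nat.mod_eq_of_lt hj]
  · rw [add_comm, Nat.add_mul_div_right _ _ hT, Nat.div_eq_of_lt hj, Nat.zero_add]

theorem pvNth_eq (N : List String) (j : Nat) (hj : j < N.length) : pvNth N j = N[j] := by
  simp [pvNth, List.getD_eq_getElem?_getD, List.getElem?_eq_getElem hj]

theorem pvAssemble (l : List (List (String × String))) (n : Int) (hT : 0 < (pvNames l).length) :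
    (PySem.List.sorted
      (((l.foldl pvTagStep (PySem.Dict.empty, PySem.Dict.empty, [])).2.2.filter
          (fun p => decide (p.1 * ((pvNames l).length : Int) + p.2.1 < n))).map
        (fun p => (p.1 * ((pvNames l).length : Int) + p.2.1, p.2.2)))
      (fun p => p.1)).map (fun p => p.2)
    = (pvSel (pvNames l) l n.toNat).map Prod.snd := by
  obtain ⟨ha, hb, hc⟩ := pvTag_spec l
  set F := l.foldl pvTagStep (PySem.Dict.empty, PySem.Dict.empty, []) with hF
  set P : Int × Int × List (String × String) → Bool :=
    fun p => decide (p.1 * ((pvNames l).length : Int) + p.2.1 < n) with hP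
  set f : Int × Int × List (String × String) → Int × List (String × String) :=
    fun p => (p.1 * ((pvNames l).length : Int) + p.2.1, p.2.2) with hf
  set L := ((pvFlat l).filter P).map f with hL
  set TP := (pvSel (pvNames l) l n.toNat).map (fun p => ((p.1 : Int), p.2)) with hTP
  -- membership in pvFlat
  have hmemFlat : ∀ p1 p2 : Int, ∀ p3, (p1, p2, p3) ∈ pvFlat l ↔
      ∃ j k : Nat, j < (pvNames l).length ∧
        (pvBkt l (pvNth (pvNames l) j))[k]? = some p3 ∧
        p1 = (k : Int) ∧ p2 = (j : Int) := by
    intro p1 p2 p3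
    rw [pvFlat, List.mem_flatMap]
    constructor
    · rintro ⟨pe, hpe, hpmem⟩
      rcases (PySem.List.mem_enumerate_iff _ _ _).mp hpe with ⟨j, hj, rfl⟩
      rcases List.mem_map.mp hpmem with ⟨kq, hkq, heq⟩
      rcases (PySem.List.mem_enumerate_iff _ _ _).mp hkq with ⟨k, hk, rfl⟩
      simp only [Prod.mk.injEq] at heq
      obtain ⟨h1, h2, h3⟩ := heq
      refine ⟨j, k, hj, ?_, by omega, by omega⟩
      rw [pvNth_eq _ j hj, ← h3]
      exact List.getElem?_eq_some_iff.mpr ⟨hk, rfl⟩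
    · rintro ⟨j, k, hj, hsome, h1, h2⟩
      obtain ⟨hk, hval⟩ := List.getElem?_eq_some_iff.mp hsome
      refine ⟨((0:Int) + (j:Int), pvNth (pvNames l) j), ?_, ?_⟩
      · rw [pvNth_eq _ j hj]
        exact (PySem.List.mem_enumerate_iff _ _ _).mpr ⟨j, hj, rfl⟩
      · rw [List.mem_map]
        refine ⟨((0:Int) + (k:Int), p3), ?_, ?_⟩
        · exact (PySem.List.mem_enumerate_iff _ _ _).mpr ⟨k, hk, by rw [hval]⟩
        · simp only [Prod.mk.injEq]
          refine ⟨by omega, by omega, trivial⟩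
  have hmemL : ∀ x1 : Int, ∀ x2, (x1, x2) ∈ L ↔ ∃ j k : Nat, j < (pvNames l).length ∧
      (pvBkt l (pvNth (pvNames l) j))[k]? = some x2 ∧
      x1 = (k:Int) * ((pvNames l).length : Int) + (j:Int) ∧ x1 < n := by
    intro x1 x2
    rw [hL, List.mem_map]
    constructor
    · rintro ⟨⟨p1, p2, p3⟩, hp, heq⟩
      rcases List.mem_filter.mp hp with ⟨hpf, hpP⟩
      rcases (hmemFlat p1 p2 p3).mp hpf with ⟨j, k, hj, hsome, h1, h2⟩
      have hPlt : p1 * ((pvNames l).length : Int) + p2 < n := of_decide_eq_true hpP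
      simp only [hf, Prod.mk.injEq] at heq
      obtain ⟨he1, he2⟩ := heq
      subst he2
      refine ⟨j, k, hj, hsome, ?_, ?_⟩
      · rw [← he1, h1, h2]
      · rw [← he1]; exact hPlt
    · rintro ⟨j, k, hj, hsome, h1, h2⟩
      refine ⟨((k:Int), (j:Int), x2), List.mem_filter.mpr
        ⟨(hmemFlat _ _ _).mpr ⟨j, k, hj, hsome, rfl, rfl⟩, ?_⟩, ?_⟩
      · rw [hP]
        simp only [decide_eq_true_eq]
        rw [← h1]; exact h2
      · rw [hf]
        simp only [Prod.mk.injEq]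
        refine ⟨h1.symm, trivial⟩
  have hmemTP : ∀ x1 : Int, ∀ x2, (x1, x2) ∈ TP ↔ ∃ i : Nat, i < n.toNat ∧
      (pvBkt l (pvNth (pvNames l) (i % (pvNames l).length)))[i / (pvNames l).length]? = some x2 ∧
      x1 = (i:Int) := by
    intro x1 x2
    rw [hTP, List.mem_map]
    constructor
    · rintro ⟨⟨i0, q0⟩, hp, heq⟩
      simp only [Prod.mk.injEq] at heq
      obtain ⟨he1, he2⟩ := heq
      rcases List.mem_filterMap.mp hp with ⟨i, hi, hfm⟩
      rcases Option.map_eq_some_iff.mp hfm with ⟨q2, hq2, hpq⟩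
      simp only [Prod.mk.injEq] at hpq
      obtain ⟨hpi, hpq2⟩ := hpq
      refine ⟨i, List.mem_range.mp hi, ?_, ?_⟩
      · rw [← he2, ← hpq2]; exact hq2
      · rw [← he1, ← hpi]
    · rintro ⟨i, hi, hsome, h1⟩
      refine ⟨(i, x2), ?_, by simp [h1]⟩
      rw [pvSel, List.mem_filterMap]
      refine ⟨i, List.mem_range.mpr hi, ?_⟩
      rw [hsome]
      rfl
  have hmem : ∀ x, x ∈ TP ↔ x ∈ L := by
    rintro ⟨x1, x2⟩
    rw [hmemTP, hmemL]
    constructor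
    · rintro ⟨i, hi, hsome, h1⟩
      refine ⟨i % (pvNames l).length, i / (pvNames l).length,
        Nat.mod_lt i hT, hsome, ?_, ?_⟩
      · rw [h1]
        exact_mod_cast (Nat.div_add_mod' i (pvNames l).length).symm
      · rw [h1]; omega
    · rintro ⟨j, k, hj, hsome, h1, h2⟩
      obtain ⟨hm, hd⟩ := pvDecode (pvNames l).length j k hT hj
      have hcast : ((k * (pvNames l).length + j : Nat) : Int) = x1 := by
        rw [h1]; push_cast; ring
      refine ⟨k * (pvNames l).length + j, by omega, ?_, by omega⟩
      rw [hm, hd]; exact hsome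
  -- Pairwise / Nodup
  have hpwSel : (pvSel (pvNames l) l n.toNat).Pairwise (fun a b => a.1 < b.1) := by
    rw [pvSel, List.pairwise_filterMap]
    apply List.Pairwise.imp ?_ (List.pairwise_lt_range (n := n.toNat))
    intro a b hab c hc c' hc'
    rcases Option.map_eq_some_iff.mp hc with ⟨q2, _, rfl⟩
    rcases Option.map_eq_some_iff.mp hc' with ⟨q2', _, rfl⟩
    exact hab
  have hpwTP : TP.Pairwise (fun a b => a.1 < b.1) := by
    rw [hTP, List.pairwise_map]
    apply hpwSel.imp
    intro a b hab
    show (a.1 : Int) < (b.1 : Int)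
    exact_mod_cast hab
  have hndTP : TP.Nodup :=
    hpwTP.imp (fun hab heq => absurd (heq ▸ hab) (lt_irrefl _))
  have hTpos : (0:Int) < ((pvNames l).length : Int) := by exact_mod_cast hT
  have hndFlatSlot : ((pvFlat l).map
      (fun p => p.1 * ((pvNames l).length : Int) + p.2.1)).Nodup := by
    rw [pvFlat, List.map_flatMap, List.nodup_flatMap]
    constructor
    · intro pe hpe
      rw [List.map_map]
      refine List.Pairwise.imp (fun h => h) ((List.pairwise_map).mpr ?_)
      apply List.Pairwise.imp ?_ (PySem.List.pairwise_lt_enumerate _ _)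
      intro a b hab
      simp only [Function.comp]
      have := mul_lt_mul_of_pos_right hab hTpos
      omega
    · apply List.Pairwise.imp_of_mem ?_ (PySem.List.pairwise_lt_enumerate _ _)
      intro pe pe' hpe hpe' hlt
      rcases (PySem.List.mem_enumerate_iff _ _ _).mp hpe with ⟨j, hj, rfl⟩
      rcases (PySem.List.mem_enumerate_iff _ _ _).mp hpe' with ⟨j', hj', rfl⟩
      intro x hx hx'
      rcases List.mem_map.mp hx with ⟨y, hy, rfl⟩
      rcases List.mem_map.mp hy with ⟨kq, hkq, rfl⟩
      rcases (PySem.List.mem_enumerate_iff _ _ _).mp hkq with ⟨k, hk, rfl⟩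
      rcases List.mem_map.mp hx' with ⟨y', hy', heq⟩
      rcases List.mem_map.mp hy' with ⟨kq', hkq', rfl⟩
      rcases (PySem.List.mem_enumerate_iff _ _ _).mp hkq' with ⟨k', hk', rfl⟩
      have hb1 : (((0:Int) + (k:Int)) * ((pvNames l).length : Int) + ((0:Int) + (j:Int)))
          % ((pvNames l).length : Int) = ((0:Int) + (j:Int)) :=
        pvSlotMod _ _ _ (by omega) (by push_cast; omega)
      have hb2 : (((0:Int) + (k':Int)) * ((pvNames l).length : Int) + ((0:Int) + (j':Int)))
          % ((pvNames l).length : Int) = ((0:Int) + (j':Int)) :=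
        pvSlotMod _ _ _ (by omega) (by push_cast; omega)
      rw [heq] at hb2
      rw [hb2] at hb1
      simp only at hlt
      omega
  have hndL : L.Nodup := by
    apply List.Nodup.of_map Prod.fst
    rw [hL, List.map_map]
    have hcomp : (Prod.fst ∘ f) = fun p => p.1 * ((pvNames l).length : Int) + p.2.1 := rfl
    rw [hcomp]
    have hsub : ((pvFlat l).filter P).Sublist (pvFlat l) := List.filter_sublist
    exact (hsub.map _).nodup hndFlatSlot
  have hpermTL : TP.Perm L := (List.perm_ext_iff_of_nodup hndTP hndL).mpr hmem
  have hpermPicked : ((F.2.2.filter P).map f).Perm L := ((hc.filter P).map f)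
  have hsorted : PySem.List.sorted ((F.2.2.filter P).map f) (fun p => p.1) = TP :=
    PySem.List.sorted_eq_of_perm_of_pairwise_lt _ TP (fun p => p.1)
      (hpermTL.trans hpermPicked.symm) hpwTP
  rw [hsorted, hTP, List.map_map]
  rfl

-- ===== VERDICT (by name: the statement is the Claim_ definition above) =====
theorem select_diverse_questions_py_spec : Claim_equal_select_diverse_questions_py := by
  intro questions n _
  unfold Spec_select_diverse_questions_py
  simp only [select_diverse_questions_py, select_diverse_questions_py_alt]
  by_cases hle : (questions.length : Int) ≤ n
  · rw [if_pos hle, if_pos hle]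
  · rw [if_neg hle, if_neg hle]
    by_cases hq : questions = []
    · subst hq
      have hn : n ≤ 0 := by simp at hle; omega
      have h0 : PySem.List.pyRange 0 n 1 = [] := PySem.List.pyRange_one_eq_nil hn
      simp [h0, PySem.List.sorted_eq_nil_iff]
    · have hTne : pvNames questions ≠ [] := by
        rcases questions with _ | ⟨q0, qs⟩
        · exact absurd rfl hq
        · rw [pvNames, List.map_cons, PySem.Set.ofList_cons]
          exact List.cons_ne_nil _ _
      have hT : 0 < (pvNames questions).length := List.length_pos_iff.mpr hTne
      obtain ⟨hk, hg⟩ := pvGroup_spec questions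
      have hnd := pvNames_nodup questions
      -- A side
      rw [hk]
      rw [PySem.List.pyRange_one, sub_zero, List.foldl_map]
      rw [(pvLoop questions (pvNames questions)
        (questions.foldl pvGroupStep PySem.Dict.empty) hg hnd hT n.toNat).2]
      -- B side
      have hsize : (((questions.foldl pvTagStep
          (PySem.Dict.empty, PySem.Dict.empty, [])).1.size : Nat) : Int)
          = ((pvNames questions).length : Int) := by
        have := (pvTag_spec questions).1
        show ((_ : PySem.Dict String Int).items.length : Int) = _
        rw [this]
        simp [PySem.List.length_enumerate]
      rw [hsize]
      exact (pvAssemble questions n hT).symm
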